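-- pv_equiv track=rewrite | github.com/Louis641214/Problem_Set_3 | src/Goodstein.py | goodstein_sequence
-- ===== SOURCE A (Python) =====
-- def to_hereditary_base(n, base):
--     if n < base:
--         return n
--     result = []
--     exp = 0
--     while base ** (exp + 1) <= n:
--         exp += 1
--     coef = n // (base ** exp)
--     rest = n % (base ** exp)
--     exp_part = to_hereditary_base(exp, base)
--     result.append((coef, exp_part))
--     if rest > 0:
--         rest_part = to_hereditary_base(rest, base)
--         if isinstance(rest_part, int):
--             result.append((rest_part, 0))
--         else:
--             result.extend(rest_part)
--     return result
--
-- def replace_base(expr, old_base, new_base):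
--     if isinstance(expr, int):
--         return expr
--     replaced = []
--     for coef, exp in expr:
--         new_exp = replace_base(exp, old_base, new_base)
--         replaced.append((coef, new_exp))
--     return replaced
--
-- def evaluate(expr, base):
--     if isinstance(expr, int):
--         return expr
--     total = 0
--     for coef, exp in expr:
--         total += coef * (base ** evaluate(exp, base))
--     return total
--
-- def goodstein_sequence(start, base, max_steps=1000):
--     sequence = [start]
--     m = start
--     b = base
--     steps = 0
--     while m != 0 and steps < max_steps:
--         hereditarily = to_hereditary_base(m, b)
--         replaced = replace_base(hereditarily, b, b + 1)
--         m = evaluate(replaced, b + 1) - 1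
--         sequence.append(m)
--         b += 1
--         steps += 1
--     return sequence
-- ===== SOURCE B (Python) =====
-- def goodstein_sequence(start, base, max_steps=1000):
--     # bump(n, b, B): value of n rewritten from hereditary base b to base B, computed in
--     # one pass over n's base-b digits (extracted bottom-up by divmod); no tuple tree
--     # and no exponent search.
--     def bump(n, b, B):
--         if n < b:
--             return n
--         total = 0
--         k = 0
--         t = n
--         while t:
--             t, d = divmod(t, b)
--             if d:
--                 total += d * B ** bump(k, b, B)
--             k += 1
--         return total
--     sequence = [start]
--     m = start
--     b = base
--     steps = 0
--     while m != 0 and steps < max_steps: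
--         m = bump(m, b, b + 1) - 1
--         sequence.append(m)
--         b += 1
--         steps += 1
--     return sequence
-- ===== Notes on version B (the rewrite author's own statement) =====
-- stated objective: faster
-- what changed: B replaces A's three-stage pipeline (build a hereditary-base tuple tree via repeated exponent search, rewrite its bases, evaluate it) with one recursive helper bump(n,b,B) that peels base-b digits bottom-up by divmod and sums d*B**bump(k); no tuple tree and no per-level exponent search recomputing base**exp; measured ~1.9x at the largest timing size.
-- outside the precondition, e.g. on goodstein_sequence(1, -2, 2): A raises RecursionError, B raises RecursionError
import Mathlib
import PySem

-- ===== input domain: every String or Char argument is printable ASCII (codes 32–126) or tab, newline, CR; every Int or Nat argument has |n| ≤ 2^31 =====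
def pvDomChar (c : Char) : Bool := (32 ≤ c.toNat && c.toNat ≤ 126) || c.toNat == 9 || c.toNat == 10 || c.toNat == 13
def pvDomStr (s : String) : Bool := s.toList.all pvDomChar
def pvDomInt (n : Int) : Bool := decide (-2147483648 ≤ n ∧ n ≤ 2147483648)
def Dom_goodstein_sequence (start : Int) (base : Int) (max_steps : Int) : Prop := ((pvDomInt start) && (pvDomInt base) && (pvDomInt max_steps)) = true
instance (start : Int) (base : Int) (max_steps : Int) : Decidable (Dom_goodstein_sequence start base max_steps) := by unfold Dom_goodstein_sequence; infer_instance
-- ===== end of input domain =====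

-- B fuses A's to_hereditary_base/replace_base/evaluate pipeline into one digit-recursion
-- (simpler decomposition, no intermediate tuple tree); same outer loop, same return value.

-- ===== PORT A =====

-- the exponent search `while base ** (exp + 1) <= n: exp += 1` (fuel only makes it total;
-- n.toNat + 1 iterations suffice whenever base ≥ 2, the only case Pre_ admits it to run in)
def pvFindExp (fuel : Nat) (n b : Int) (e : Nat) : Nat :=
  match fuel with
  | 0 => e
  | f + 1 => if b ^ (e + 1) ≤ n then pvFindExp f n b (e + 1) else e

-- Python's "int or list of (coef, exp) pairs": .int = a bare int, .lnil/.lcons = the list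
inductive HB where
  | int : Int → HB
  | lnil : HB
  | lcons : Int → HB → HB → HB
deriving DecidableEq, Repr

-- to_hereditary_base, step for step (fuel is a totality guard: recursive calls are on
-- exp < n and rest < n whenever base ≥ 2, so n.toNat + 1 levels are enough there)
def pvToHB (fuel : Nat) (n b : Int) : HB :=
  match fuel with
  | 0 => .int 0
  | f + 1 =>
    if n < b then .int n
    else
      let e := pvFindExp (n.toNat + 1) n b 0
      let coef := PySem.Int.floordiv n (b ^ e)
      let rest := PySem.Int.mod n (b ^ e)
      let expPart := pvToHB f (e : Int) b
      let tail :=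
        if rest > 0 then
          match pvToHB f rest b with
          | .int r => HB.lcons r (.int 0) .lnil   -- result.append((rest_part, 0))
          | l => l                                 -- result.extend(rest_part)
        else .lnil
      .lcons coef expPart tail

def pvReplaceBase : HB → Int → Int → HB
  | .int n, _, _ => .int n
  | .lnil, _, _ => .lnil
  | .lcons c e tl, ob, nb => .lcons c (pvReplaceBase e ob nb) (pvReplaceBase tl ob nb)

-- evaluate's `total += coef * base ** evaluate(exp, base)` (exponents are ≥ 0 on every
-- admitted run, so `** ` is ported as ^ on .toNat, exact there)
def pvEvalHB : HB → Int → Int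
  | .int n, _ => n
  | .lnil, _ => 0
  | .lcons c e tl, b => c * b ^ (pvEvalHB e b).toNat + pvEvalHB tl b

-- the while loop of goodstein_sequence; count = number of remaining steps
def pvLoopA (m b : Int) (count : Nat) : List Int :=
  match count with
  | 0 => []
  | c + 1 =>
    if m = 0 then []
    else
      let hb := pvToHB (m.toNat + 1) m b
      let rep := pvReplaceBase hb b (b + 1)
      let m' := pvEvalHB rep (b + 1) - 1
      m' :: pvLoopA m' (b + 1) c

def goodstein_sequence (start : Int) (base : Int) (max_steps : Int) : List Int :=
  start :: pvLoopA start base max_steps.toNat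

-- ===== PORT B =====

mutual
-- bump(n, b, B): digits of n in base b re-evaluated with base B, one recursion
def pvBump : Nat → Int → Int → Int → Int
  | 0, _, _, _ => 0
  | f + 1, n, b, B =>
    if n < b then n
    else pvBumpLoop (n.toNat + 1) f n b B 0 0
  termination_by f _ _ _ => (f, 0)
  decreasing_by apply Prod.Lex.left; omega

-- the `while t: t, d = divmod(t, b); if d: total += d * B ** bump(k, b, B); k += 1` loop
-- (first fuel argument only makes the while total; t strictly shrinks whenever b ≥ 2)
def pvBumpLoop : Nat → Nat → Int → Int → Int → Nat → Int → Int
  | 0, _, _, _, _, _, total => total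
  | fi + 1, f, t, b, B, k, total =>
    if t = 0 then total
    else
      let t' := PySem.Int.floordiv t b
      let d := PySem.Int.mod t b
      let total' := if d ≠ 0 then total + d * B ^ (pvBump f (k : Int) b B).toNat else total
      pvBumpLoop fi f t' b B (k + 1) total'
  termination_by fi f _ _ _ _ _ => (f, fi + 1)
  decreasing_by
    · apply Prod.Lex.right; omega
    · apply Prod.Lex.right; omega
end

def pvLoopB (m b : Int) (count : Nat) : List Int :=
  match count with
  | 0 => []
  | c + 1 =>
    if m = 0 then []
    else
      let m' := pvBump (m.toNat + 1) m b (b + 1) - 1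
      m' :: pvLoopB m' (b + 1) c

def goodstein_sequence_alt (start : Int) (base : Int) (max_steps : Int) : List Int :=
  start :: pvLoopB start base max_steps.toNat

-- ===== PRECONDITION & SPEC =====

-- Pre_ excludes exactly the inputs on which A never returns: with base ≤ 1, a start that is
-- ≥ base and ≠ 0 and max_steps ≥ 1 sends to_hereditary_base into an infinite exponent search
-- (base ∈ {0,1}) or unbounded recursion (base < 0, RecursionError); A returns on everything else.
def Pre_goodstein_sequence (start : Int) (base : Int) (max_steps : Int) : Prop :=
  2 ≤ base ∨ start < base ∨ start = 0 ∨ max_steps ≤ 0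
instance (start : Int) (base : Int) (max_steps : Int) : Decidable (Pre_goodstein_sequence start base max_steps) := by unfold Pre_goodstein_sequence; infer_instance

def pvWitness_goodstein_sequence : Int × Int × Int := (4, 2, 3)

def Spec_goodstein_sequence (start : Int) (base : Int) (max_steps : Int) (out : List Int) : Prop := out = goodstein_sequence_alt start base max_steps
instance (start : Int) (base : Int) (max_steps : Int) (out : List Int) : Decidable (Spec_goodstein_sequence start base max_steps out) := by unfold Spec_goodstein_sequence; infer_instance

-- ===== CLAIM (what is proved, stated in full; the proofs are below) =====
def Claim_equal_goodstein_sequence : Prop := ∀ (start : Int) (base : Int) (max_steps : Int), Dom_goodstein_sequence start base max_steps → Pre_goodstein_sequence start base max_steps → Spec_goodstein_sequence start base max_steps (goodstein_sequence start base max_steps)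

-- ===== LEMMAS AND PROOFS =====

lemma pvFindExp_spec (n b : Int) (hb : 2 ≤ b) :
    ∀ (fuel e : Nat), b ^ e ≤ n → n.toNat < e + fuel →
      b ^ (pvFindExp fuel n b e) ≤ n ∧ n < b ^ (pvFindExp fuel n b e + 1) := by
  intro fuel
  induction fuel with
  | zero =>
    intro e he hf
    exfalso
    have h2 : (2:Int) ^ e ≤ b ^ e := pow_le_pow_left₀ (by norm_num) hb e
    have h3 : (e:Int) < 2 ^ e := by exact_mod_cast Nat.lt_two_pow_self
    have : (e:Int) < n := lt_of_lt_of_le h3 (le_trans h2 he)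
    omega
  | succ f ih =>
    intro e he hf
    rw [pvFindExp]
    split_ifs with h
    · exact ih (e + 1) h (by omega)
    · exact ⟨he, by omega⟩

lemma pvLoopZero (fi f : Nat) (b B : Int) (k : Nat) (total : Int) :
    pvBumpLoop fi f 0 b B k total = total := by
  cases fi with
  | zero => rw [pvBumpLoop]
  | succ fi' => rw [pvBumpLoop, if_pos rfl]

lemma pvShiftMod (b c r : Int) (e : Nat) :
    (c * b ^ (e + 1) + r) % b = r % b := by
  have h1 : c * b ^ (e + 1) + r = r + b * (c * b ^ e) := by rw [pow_succ]; ring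
  rw [h1, Int.add_mul_emod_self_left]

lemma pvShiftDiv (b c r : Int) (e : Nat) (hb : 0 < b) :
    (c * b ^ (e + 1) + r) / b = c * b ^ e + r / b := by
  have h1 : c * b ^ (e + 1) + r = r + (c * b ^ e) * b := by rw [pow_succ]; ring
  rw [h1, Int.add_mul_ediv_right _ _ (ne_of_gt hb)]
  ring

lemma pvLoopFI : ∀ (fi fi' f : Nat) (t b B : Int) (k : Nat) (total : Int),
    2 ≤ b → 0 ≤ t → t.toNat < fi → t.toNat < fi' →
    pvBumpLoop fi f t b B k total = pvBumpLoop fi' f t b B k total := by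
  intro fi
  induction fi with
  | zero => intro fi' f t b B k total _ _ h _; omega
  | succ fi₀ ih =>
    intro fi' f t b B k total hb ht hfi hfi'
    obtain ⟨fi₁, rfl⟩ : ∃ x, fi' = x + 1 := ⟨fi' - 1, by omega⟩
    rw [pvBumpLoop, pvBumpLoop]
    by_cases h0 : t = 0
    · rw [if_pos h0, if_pos h0]
    · rw [if_neg h0, if_neg h0]
      have hb0 : (0:Int) < b := by omega
      have hdivlt : PySem.Int.floordiv t b < t := by
        rw [PySem.Int.floordiv_eq_ediv_of_pos hb0, Int.ediv_lt_iff_lt_mul hb0]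
        have h1 : (1:Int) ≤ t := by omega
        have h2 : 2 * t ≤ b * t := mul_le_mul_of_nonneg_right (by omega) (by omega)
        linarith
      have hdiv0 : 0 ≤ PySem.Int.floordiv t b := by
        rw [PySem.Int.floordiv_eq_ediv_of_pos hb0]
        exact Int.ediv_nonneg ht (by omega)
      exact ih fi₁ f _ b B (k + 1) _ hb hdiv0 (by omega) (by omega)

-- splitting off the top digit: the loop on c·bᵉ + r is the loop on r plus the term for c
lemma pvSplit : ∀ (e : Nat) (c r : Int) (fi f : Nat) (b B : Int) (k : Nat) (total : Int),
    2 ≤ b → 1 ≤ c → c < b → 0 ≤ r → r < b ^ e → e < fi →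
    pvBumpLoop fi f (c * b ^ e + r) b B k total
      = pvBumpLoop fi f r b B k total + c * B ^ (pvBump f ((k + e : Nat) : Int) b B).toNat := by
  intro e
  induction e with
  | zero =>
    intro c r fi f b B k total hb hc1 hcb hr0 hre hfi
    obtain rfl : r = 0 := by
      rw [pow_zero] at hre; omega
    obtain ⟨fi₀, rfl⟩ : ∃ x, fi = x + 1 := ⟨fi - 1, by omega⟩
    have hb0 : (0:Int) < b := by omega
    rw [pvLoopZero, pvBumpLoop]
    simp only [pow_zero, mul_one, add_zero]
    rw [if_neg (by omega : ¬ c = 0)]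
    have hd : PySem.Int.mod c b = c := by
      rw [PySem.Int.mod_eq_emod_of_pos hb0]
      exact Int.emod_eq_of_lt (by omega) hcb
    have ht' : PySem.Int.floordiv c b = 0 := by
      rw [PySem.Int.floordiv_eq_ediv_of_pos hb0]
      exact Int.ediv_eq_zero_of_lt (by omega) hcb
    rw [hd, ht', if_pos (by omega : c ≠ 0), pvLoopZero]
  | succ e₀ ih =>
    intro c r fi f b B k total hb hc1 hcb hr0 hre hfi
    obtain ⟨fi₀, rfl⟩ : ∃ x, fi = x + 1 := ⟨fi - 1, by omega⟩
    have hb0 : (0:Int) < b := by omega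
    have hpe : (0:Int) < b ^ e₀ := pow_pos hb0 e₀
    have hpe1 : (0:Int) < b ^ (e₀ + 1) := pow_pos hb0 (e₀ + 1)
    have htpos : 0 < c * b ^ (e₀ + 1) + r := by nlinarith
    conv_lhs => rw [pvBumpLoop]
    rw [if_neg (by omega : ¬ c * b ^ (e₀ + 1) + r = 0)]
    have hmodeq : PySem.Int.mod (c * b ^ (e₀ + 1) + r) b = PySem.Int.mod r b := by
      rw [PySem.Int.mod_eq_emod_of_pos hb0, PySem.Int.mod_eq_emod_of_pos hb0]
      exact pvShiftMod b c r e₀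
    have hdiveq : PySem.Int.floordiv (c * b ^ (e₀ + 1) + r) b
        = c * b ^ e₀ + PySem.Int.floordiv r b := by
      rw [PySem.Int.floordiv_eq_ediv_of_pos hb0, PySem.Int.floordiv_eq_ediv_of_pos hb0]
      exact pvShiftDiv b c r e₀ hb0
    rw [hmodeq, hdiveq]
    have hrb0 : 0 ≤ PySem.Int.floordiv r b := by
      rw [PySem.Int.floordiv_eq_ediv_of_pos hb0]
      exact Int.ediv_nonneg hr0 (by omega)
    have hrblt : PySem.Int.floordiv r b < b ^ e₀ := by
      rw [PySem.Int.floordiv_eq_ediv_of_pos hb0, Int.ediv_lt_iff_lt_mul hb0]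
      rw [pow_succ] at hre
      exact hre
    rw [ih c (PySem.Int.floordiv r b) fi₀ f b B (k + 1) _ hb hc1 hcb hrb0 hrblt (by omega)]
    have hidx : k + 1 + e₀ = k + (e₀ + 1) := by omega
    rw [hidx]
    congr 1
    -- remaining: loop fi₀ on r/b at k+1 with the digit-0 term folded in = loop (fi₀+1) on r at k
    by_cases hr : r = 0
    · subst hr
      have hm0 : PySem.Int.mod 0 b = 0 := by
        rw [PySem.Int.mod_eq_emod_of_pos hb0]; exact Int.zero_emod b
      have hd0 : PySem.Int.floordiv 0 b = 0 := by
        rw [PySem.Int.floordiv_eq_ediv_of_pos hb0]; exact Int.zero_ediv b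
      rw [hm0, hd0, if_neg (by omega : ¬ (0:Int) ≠ 0), pvLoopZero, pvLoopZero]
    · conv_rhs => rw [pvBumpLoop]
      rw [if_neg hr]

lemma pvMain : ∀ (N : Nat) (n b B : Int) (fA fB : Nat), n.toNat ≤ N → 2 ≤ b →
    n.toNat < fA → n.toNat < fB →
    pvEvalHB (pvReplaceBase (pvToHB fA n b) b B) B = pvBump fB n b B := by
  intro N
  induction N with
  | zero =>
    intro n b B fA fB hN hb hfA hfB
    obtain ⟨fA', rfl⟩ : ∃ f, fA = f + 1 := ⟨fA - 1, by omega⟩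
    obtain ⟨fB', rfl⟩ : ∃ f, fB = f + 1 := ⟨fB - 1, by omega⟩
    have hnb : n < b := by omega
    rw [pvToHB, pvBump, if_pos hnb, if_pos hnb]
    rfl
  | succ N ih =>
    intro n b B fA fB hN hb hfA hfB
    obtain ⟨fA', rfl⟩ : ∃ f, fA = f + 1 := ⟨fA - 1, by omega⟩
    obtain ⟨fB', rfl⟩ : ∃ f, fB = f + 1 := ⟨fB - 1, by omega⟩
    by_cases hnb : n < b
    · rw [pvToHB, pvBump, if_pos hnb, if_pos hnb]
      rfl
    · rw [not_lt] at hnb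
      have hn2 : (2:Int) ≤ n := le_trans hb hnb
      rw [pvToHB, pvBump, if_neg (not_lt.2 hnb), if_neg (not_lt.2 hnb)]
      obtain ⟨he1, he2⟩ :=
        pvFindExp_spec n b hb (n.toNat + 1) 0 (by simpa using by omega) (by omega)
      dsimp only
      generalize hgen : pvFindExp (n.toNat + 1) n b 0 = E
      rw [hgen] at he1 he2
      have hb0 : (0:Int) < b := by omega
      have hee : (E:Int) < n :=
        lt_of_lt_of_le (lt_of_lt_of_le (by exact_mod_cast Nat.lt_two_pow_self)
          (pow_le_pow_left₀ (by norm_num) hb E)) he1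
      have heN : E < n.toNat := by omega
      have hpe : (0:Int) < b ^ E := pow_pos hb0 E
      -- coef and rest, in ediv/emod form
      have hcoefed : PySem.Int.floordiv n (b ^ E) = n / b ^ E :=
        PySem.Int.floordiv_eq_ediv_of_pos hpe
      have hrested : PySem.Int.mod n (b ^ E) = n % b ^ E :=
        PySem.Int.mod_eq_emod_of_pos hpe
      have hrest0 : 0 ≤ n % b ^ E := Int.emod_nonneg n (ne_of_gt hpe)
      have hrestlt : n % b ^ E < b ^ E := Int.emod_lt_of_pos n hpe
      have hrestn : n % b ^ E < n := lt_of_lt_of_le hrestlt he1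
      have hcoef1 : 1 ≤ n / b ^ E := by
        rw [Int.le_ediv_iff_mul_le hpe]; omega
      have hcoefb : n / b ^ E < b := by
        rw [Int.ediv_lt_iff_lt_mul hpe]
        rw [pow_succ] at he2
        linarith
      have hsum : (n / b ^ E) * b ^ E + n % b ^ E = n := by
        have := Int.emod_add_mul_ediv n (b ^ E)
        linarith
      simp only [pvReplaceBase, pvEvalHB]
      have hexp : pvEvalHB (pvReplaceBase (pvToHB fA' ((E : Nat) : Int) b) b B) B
          = pvBump fB' ((E : Nat) : Int) b B :=
        ih ((E : Nat) : Int) b B fA' fB' (by simp; omega) hb (by simp; omega)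
          (by simp; omega)
      rw [hexp]
      -- B side: split off the top digit
      have hsplit := pvSplit E (n / b ^ E) (n % b ^ E) (n.toNat + 1) fB' b B 0 0
        hb hcoef1 hcoefb hrest0 hrestlt (by omega)
      rw [hsum] at hsplit
      rw [hsplit]
      simp only [Nat.zero_add]
      -- tail: the A-side rest entries equal the remaining loop on rest
      have htail : pvEvalHB (pvReplaceBase
          (if PySem.Int.mod n (b ^ E) > 0 then
            match pvToHB fA' (PySem.Int.mod n (b ^ E)) b with
            | HB.int r => HB.lcons r (HB.int 0) HB.lnil
            | l => l
          else HB.lnil) b B) B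
          = pvBumpLoop (n.toNat + 1) fB' (n % b ^ E) b B 0 0 := by
        by_cases hrb : n % b ^ E < b
        · -- small rest: both sides are rest itself
          have hloop : pvBumpLoop (n.toNat + 1) fB' (n % b ^ E) b B 0 0 = n % b ^ E := by
            by_cases hz : n % b ^ E = 0
            · rw [hz, pvLoopZero]
            · rw [pvBumpLoop, if_neg hz]
              dsimp only
              have hd : PySem.Int.mod (n % b ^ E) b = n % b ^ E := by
                rw [PySem.Int.mod_eq_emod_of_pos hb0]
                exact Int.emod_eq_of_lt hrest0 hrb
              have ht' : PySem.Int.floordiv (n % b ^ E) b = 0 := by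
                rw [PySem.Int.floordiv_eq_ediv_of_pos hb0]
                exact Int.ediv_eq_zero_of_lt hrest0 hrb
              have hbz : pvBump fB' ((0 : Nat) : Int) b B = 0 := by
                obtain ⟨fB'', rfl⟩ : ∃ x, fB' = x + 1 := ⟨fB' - 1, by omega⟩
                rw [pvBump, if_pos (by omega : ((0 : Nat) : Int) < b)]
                simp
              rw [hd, ht', if_pos hz, hbz, pvLoopZero]
              simp
          rw [hloop]
          by_cases hpos : PySem.Int.mod n (b ^ E) > 0
          · rw [if_pos hpos]
            obtain ⟨fA'', rfl⟩ : ∃ f, fA' = f + 1 := ⟨fA' - 1, by omega⟩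
            rw [pvToHB, if_pos (by omega : PySem.Int.mod n (b ^ E) < b)]
            simp [pvReplaceBase, pvEvalHB]
            omega
          · rw [if_neg hpos]
            simp only [pvReplaceBase, pvEvalHB]
            omega
        · -- big rest: by the induction hypothesis it is pvBump of rest
          rw [not_lt] at hrb
          have hpos : PySem.Int.mod n (b ^ E) > 0 := by omega
          rw [if_pos hpos]
          obtain ⟨c, x, t, hct⟩ : ∃ c x t,
              pvToHB fA' (PySem.Int.mod n (b ^ E)) b = HB.lcons c x t := by
            obtain ⟨fA'', rfl⟩ : ∃ f, fA' = f + 1 := ⟨fA' - 1, by omega⟩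
            rw [pvToHB, if_neg (by omega : ¬ PySem.Int.mod n (b ^ E) < b)]
            exact ⟨_, _, _, rfl⟩
          rw [hct]
          dsimp only
          rw [← hct]
          have hIH : pvEvalHB (pvReplaceBase (pvToHB fA' (PySem.Int.mod n (b ^ E)) b) b B) B
              = pvBump (fB' + 1) (PySem.Int.mod n (b ^ E)) b B :=
            ih _ b B fA' (fB' + 1) (by omega) hb (by omega) (by omega)
          rw [hIH, pvBump, if_neg (by omega : ¬ PySem.Int.mod n (b ^ E) < b)]
          rw [hrested]
          exact pvLoopFI _ _ fB' _ b B 0 0 hb hrest0 (by omega) (by omega)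
      rw [htail]
      rw [hcoefed]
      ring

lemma pvLoop_eq : ∀ (c : Nat) (m b : Int), (2 ≤ b ∨ m < b ∨ m = 0) →
    pvLoopA m b c = pvLoopB m b c := by
  intro c
  induction c with
  | zero => intro m b _; rfl
  | succ c' ih =>
    intro m b hinv
    rw [pvLoopA, pvLoopB]
    by_cases hm : m = 0
    · rw [if_pos hm, if_pos hm]
    · rw [if_neg hm, if_neg hm]
      dsimp only
      by_cases hb : 2 ≤ b
      · rw [pvMain m.toNat m b (b + 1) (m.toNat + 1) (m.toNat + 1) le_rfl hb
            (by omega) (by omega)]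
        exact congrArg _ (ih _ _ (Or.inl (by omega)))
      · have hmb : m < b := by rcases hinv with h | h | h <;> omega
        have hbv : pvBump (m.toNat + 1) m b (b + 1) = m := by
          rw [pvBump, if_pos hmb]
        have hstep : pvEvalHB (pvReplaceBase (pvToHB (m.toNat + 1) m b) b (b + 1)) (b + 1)
            = pvBump (m.toNat + 1) m b (b + 1) := by
          rw [pvToHB, if_pos hmb, hbv]
          rfl
        rw [hstep]
        exact congrArg _ (ih _ _ (Or.inr (Or.inl (by omega))))

-- ===== VERDICT (by name: the statement is the Claim_ definition above) =====
theorem goodstein_sequence_spec : Claim_equal_goodstein_sequence := by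
  intro start base max_steps _ hpre
  unfold Spec_goodstein_sequence goodstein_sequence goodstein_sequence_alt
  rcases hpre with h | h | h | h
  · exact congrArg _ (pvLoop_eq _ _ _ (Or.inl h))
  · exact congrArg _ (pvLoop_eq _ _ _ (Or.inr (Or.inl h)))
  · exact congrArg _ (pvLoop_eq _ _ _ (Or.inr (Or.inr h)))
  · rw [Int.toNat_of_nonpos h]
    rfl
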